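-- pv_equiv track=rewrite | github.com/Felix3214g/reasoning-AI | MODEL_2.py | _extract_evaluation
-- ===== SOURCE A (Python) =====
-- from typing import Dict, List, Any, Optional, Tuple
--
-- def _extract_evaluation(evaluation_text: str) -> Tuple[Dict[str, int], str]:
--     """Extract scores and assessment from the evaluation text."""
--     scores = {
--         "correctness": 0,
--         "completeness": 0,
--         "efficiency": 0,
--         "clarity": 0,
--         "robustness": 0,
--         "overall": 0
--     }
--
--     # Parse evaluation text for scores
--     lines = evaluation_text.split('\n')
--     assessment = ""
--     in_assessment = False
--
--     for line in lines:
--         line = line.strip()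
--         if not line:
--             continue
--
--         # Look for score indicators
--         lower_line = line.lower()
--
--         # Check for overall assessment section
--         if any(keyword in lower_line for keyword in ["overall assessment", "final assessment", "conclusion", "summary"]):
--             in_assessment = True
--             assessment = line + "\n"
--         elif in_assessment:
--             assessment += line + "\n"
--
--         # Extract scores
--         for criterion in scores.keys():
--             if criterion.lower() in lower_line and any(char.isdigit() for char in line):
--                 # Extract the score (assumed to be a number 1-10)
--                 score_match = None
--                 if ":" in line:
--                     after_colon = line.split(":", 1)[1]
--                     for word in after_colon.split():
--                         if word.isdigit() and 1 <= int(word) <= 10: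
--                             score_match = int(word)
--                             break
--                 if not score_match:
--                     # Look for a pattern like "7/10" or "7 out of 10"
--                     if "/" in line:
--                         for part in line.split():
--                             if "/" in part:
--                                 num, denom = part.split("/", 1)
--                                 if num.isdigit() and denom.isdigit():
--                                     score_match = int(num)
--                                     break
--
--                 if score_match:
--                     scores[criterion] = score_match
--
--     # If we didn't find an explicit assessment, extract the last few paragraphs
--     if not assessment:
--         paragraphs = evaluation_text.split("\n\n")
--         if paragraphs:
--             assessment = paragraphs[-1]
--
--     # Calculate overall score if not explicitly found
--     if scores["overall"] == 0 and any(scores.values()):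
--         # Calculate average of other scores
--         valid_scores = [s for s in scores.values() if s > 0]
--         if valid_scores:
--             scores["overall"] = sum(valid_scores) // len(valid_scores)
--         else:
--             scores["overall"] = 5  # Default middle score
--
--     return scores, assessment
-- ===== SOURCE B (Python) =====
-- _CRITERIA = ["correctness", "completeness", "efficiency", "clarity", "robustness", "overall"]
-- _KEYWORDS = ["overall assessment", "final assessment", "conclusion", "summary"]
--
-- def _score_of(line):
--     """Score carried by one line: first 1-10 integer after a colon, else the
--     numerator of the first all-digit num/denom token."""
--     score = None
--     if ":" in line:
--         for word in line.split(":", 1)[1].split():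
--             if word.isdigit() and 1 <= int(word) <= 10:
--                 score = int(word)
--                 break
--     if not score and "/" in line:
--         for part in line.split():
--             if "/" in part:
--                 num, denom = part.split("/", 1)
--                 if num.isdigit() and denom.isdigit():
--                     score = int(num)
--                     break
--     return score
--
-- def _last_score(criterion, lines):
--     """Score of the last line mentioning the criterion with a digit and a usable score."""
--     for line in reversed(lines):
--         if criterion in line.lower() and any(c.isdigit() for c in line):
--             score = _score_of(line)
--             if score:
--                 return score
--     return 0
--
-- def _extract_evaluation(evaluation_text):
--     lines = [s for s in (raw.strip() for raw in evaluation_text.split('\n')) if s]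
--
--     # Assessment: the suffix of lines starting at the LAST keyword line.
--     tail = None
--     for i in range(len(lines) - 1, -1, -1):
--         if any(k in lines[i].lower() for k in _KEYWORDS):
--             tail = lines[i:]
--             break
--     if tail is None:
--         assessment = evaluation_text.split("\n\n")[-1]
--     else:
--         assessment = "".join(line + "\n" for line in tail)
--
--     # Scores: for each criterion, search backwards for its last stated score.
--     scores = {c: _last_score(c, lines) for c in _CRITERIA}
--     if scores["overall"] == 0 and any(scores.values()):
--         valid = [s for s in scores.values() if s > 0]
--         scores["overall"] = sum(valid) // len(valid) if valid else 5
--     return scores, assessment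
-- ===== Notes on version B (the rewrite author's own statement) =====
-- stated objective: alternative
-- what changed: A's single stateful line loop (dict mutated per criterion with the score re-extracted for every matching criterion, plus an in_assessment flag) is replaced by a declarative reconstruction: the assessment is the joined suffix of stripped lines starting at the last keyword line (found by a backward index scan), and each criterion's score is found independently by a backward search for the last line mentioning it with a usable score, building the dict once by comprehension.
import Mathlib
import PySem

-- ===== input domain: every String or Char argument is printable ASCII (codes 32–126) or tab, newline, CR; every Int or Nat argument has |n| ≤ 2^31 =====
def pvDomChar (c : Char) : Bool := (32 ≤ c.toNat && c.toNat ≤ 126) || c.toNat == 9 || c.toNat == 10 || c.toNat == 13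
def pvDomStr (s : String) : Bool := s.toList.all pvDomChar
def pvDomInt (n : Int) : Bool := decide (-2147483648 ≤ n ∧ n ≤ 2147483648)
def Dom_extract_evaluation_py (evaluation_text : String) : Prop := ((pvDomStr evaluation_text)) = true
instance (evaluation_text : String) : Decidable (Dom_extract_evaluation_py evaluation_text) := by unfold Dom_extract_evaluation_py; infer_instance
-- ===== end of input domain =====

-- B restructures A's single stateful loop into a per-criterion backward search for the last
-- stated score plus a last-keyword-suffix computation for the assessment (objective: alternative).

-- Python truthiness of an Optional[int]: None and 0 are falsy.
def pvTruthy (o : Option Int) : Bool :=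
  match o with
  | some v => v != 0
  | none => false

-- ===== PORT A =====
def pvKeywordsA : List (List Char) :=
  ["overall assessment".toList, "final assessment".toList, "conclusion".toList, "summary".toList]

def pvCriteriaA : List String :=
  ["correctness", "completeness", "efficiency", "clarity", "robustness", "overall"]

-- the score_match computation of A's inner loop body (it does not mention the criterion)
def pvScoreMatchA (line : List Char) : Option Int :=
  let score_match : Option Int := none
  let score_match :=
    if PySem.Chars.isIn [':'] line then
      let after_colon := (PySem.Chars.splitOnMax line [':'] 1).getD 1 []
      match (PySem.Chars.split₀ after_colon).find?
          (fun w => PySem.Chars.strIsdigit w &&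
            (decide (1 ≤ (PySem.Int.ofChars? w).getD 0) && decide ((PySem.Int.ofChars? w).getD 0 ≤ 10))) with
      | some w => some ((PySem.Int.ofChars? w).getD 0)
      | none => score_match
    else score_match
  let score_match :=
    if !(pvTruthy score_match) then
      if PySem.Chars.isIn ['/'] line then
        match (PySem.Chars.split₀ line).find?
            (fun part => PySem.Chars.isIn ['/'] part &&
              (PySem.Chars.strIsdigit ((PySem.Chars.splitOnMax part ['/'] 1).getD 0 []) &&
               PySem.Chars.strIsdigit ((PySem.Chars.splitOnMax part ['/'] 1).getD 1 []))) with
        | some part => some ((PySem.Int.ofChars? ((PySem.Chars.splitOnMax part ['/'] 1).getD 0 [])).getD 0)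
        | none => score_match
      else score_match
    else score_match
  score_match

-- the assessment update of A's loop body
def pvAssessStepA (st : List Char × Bool) (line : List Char) : List Char × Bool :=
  let lower_line := PySem.Chars.lower line
  if pvKeywordsA.any (fun k => PySem.Chars.isIn k lower_line) then (line ++ ['\n'], true)
  else if st.2 then (st.1 ++ line ++ ['\n'], st.2) else st

-- the `for criterion in scores.keys()` update of A's loop body (the keys are the six fixed criteria)
def pvScoresStepA (d : PySem.Dict String Int) (line : List Char) : PySem.Dict String Int :=
  let lower_line := PySem.Chars.lower line
  pvCriteriaA.foldl (fun d criterion =>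
    if PySem.Chars.isIn (PySem.Chars.lower criterion.toList) lower_line && line.any PySem.Chars.isdigit then
      let score_match := pvScoreMatchA line
      if pvTruthy score_match then d.insert criterion (score_match.getD 0) else d
    else d) d

def pvLineStepA (s : PySem.Dict String Int × (List Char × Bool)) (line : List Char) :
    PySem.Dict String Int × (List Char × Bool) :=
  (pvScoresStepA s.1 line, pvAssessStepA s.2 line)

def extract_evaluation_py (evaluation_text : String) : (List (String × Int)) × String :=
  let scores : PySem.Dict String Int :=
    ⟨[("correctness", 0), ("completeness", 0), ("efficiency", 0),
      ("clarity", 0), ("robustness", 0), ("overall", 0)]⟩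
  let lines := PySem.Chars.splitOn evaluation_text.toList ['\n']
  let st := lines.foldl (fun s rawline =>
      let line := PySem.Chars.strip rawline
      if line = [] then s else pvLineStepA s line) (scores, ([], false))
  let scores := st.1
  let assessment := st.2.1
  let assessment :=
    if assessment = [] then
      let paragraphs := PySem.Chars.splitOn evaluation_text.toList ('\n' :: '\n' :: [])
      if paragraphs ≠ [] then paragraphs.getLastD [] else assessment
    else assessment
  let scores :=
    if scores.getD "overall" 0 == 0 && scores.values.any (fun v => v != 0) then
      let valid_scores := scores.values.filter (fun s => decide (0 < s))
      if valid_scores ≠ [] then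
        scores.insert "overall" (PySem.Int.floordiv valid_scores.sum (valid_scores.length : Int))
      else scores.insert "overall" 5
    else scores
  (scores.items, String.ofList assessment)

-- ===== PORT B =====
def pvCriteriaB : List String :=
  ["correctness", "completeness", "efficiency", "clarity", "robustness", "overall"]

def pvKeywordsB : List (List Char) :=
  ["overall assessment".toList, "final assessment".toList, "conclusion".toList, "summary".toList]

-- the stripped non-empty lines (B's comprehension)
def pvLinesOf (evaluation_text : String) : List (List Char) :=
  ((PySem.Chars.splitOn evaluation_text.toList ['\n']).map PySem.Chars.strip).filter (fun s => !s.isEmpty)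

-- _score_of
def pvScoreOfB (line : List Char) : Option Int :=
  let score : Option Int :=
    if PySem.Chars.isIn [':'] line then
      match (PySem.Chars.split₀ ((PySem.Chars.splitOnMax line [':'] 1).getD 1 [])).find?
          (fun w => PySem.Chars.strIsdigit w &&
            (decide (1 ≤ (PySem.Int.ofChars? w).getD 0) && decide ((PySem.Int.ofChars? w).getD 0 ≤ 10))) with
      | some w => some ((PySem.Int.ofChars? w).getD 0)
      | none => none
    else none
  if !(pvTruthy score) && PySem.Chars.isIn ['/'] line then
    match (PySem.Chars.split₀ line).find?
        (fun part => PySem.Chars.isIn ['/'] part &&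
          (PySem.Chars.strIsdigit ((PySem.Chars.splitOnMax part ['/'] 1).getD 0 []) &&
           PySem.Chars.strIsdigit ((PySem.Chars.splitOnMax part ['/'] 1).getD 1 []))) with
    | some part => some ((PySem.Int.ofChars? ((PySem.Chars.splitOnMax part ['/'] 1).getD 0 [])).getD 0)
    | none => score
  else score

-- _last_score's `for line in reversed(lines)` loop, as recursion over the reversed list
def pvLastScoreGoB (criterion : String) (rev : List (List Char)) : Int :=
  match rev with
  | [] => 0
  | line :: rest =>
    if PySem.Chars.isIn criterion.toList (PySem.Chars.lower line) && line.any PySem.Chars.isdigit then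
      let score := pvScoreOfB line
      if pvTruthy score then score.getD 0 else pvLastScoreGoB criterion rest
    else pvLastScoreGoB criterion rest

def pvLastScoreB (criterion : String) (lines : List (List Char)) : Int :=
  pvLastScoreGoB criterion lines.reverse

-- the `for i in range(len(lines)-1, -1, -1)` search for the LAST keyword line:
-- recursion that prefers a hit in the tail, i.e. scans from the back; returns lines[i:]
def pvTailB : List (List Char) → Option (List (List Char))
  | [] => none
  | line :: rest =>
    match pvTailB rest with
    | some t => some t
    | none =>
      if pvKeywordsB.any (fun k => PySem.Chars.isIn k (PySem.Chars.lower line)) then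
        some (line :: rest)
      else none

def extract_evaluation_py_alt (evaluation_text : String) : (List (String × Int)) × String :=
  let lines := pvLinesOf evaluation_text
  let assessment :=
    match pvTailB lines with
    | none => (PySem.Chars.splitOn evaluation_text.toList ('\n' :: '\n' :: [])).getLastD []
    | some tail => PySem.Chars.join [] (tail.map (fun line => line ++ ['\n']))
  let scores : PySem.Dict String Int := ⟨pvCriteriaB.map (fun c => (c, pvLastScoreB c lines))⟩
  let scores :=
    if scores.getD "overall" 0 == 0 && scores.values.any (fun v => v != 0) then
      let valid := scores.values.filter (fun s => decide (0 < s))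
      if valid ≠ [] then
        scores.insert "overall" (PySem.Int.floordiv valid.sum (valid.length : Int))
      else scores.insert "overall" 5
    else scores
  (scores.items, String.ofList assessment)

-- ===== PRECONDITION & SPEC =====
def Spec_extract_evaluation_py (evaluation_text : String) (out : (List (String × Int)) × String) : Prop := out = extract_evaluation_py_alt evaluation_text
instance (evaluation_text : String) (out : (List (String × Int)) × String) : Decidable (Spec_extract_evaluation_py evaluation_text out) := by unfold Spec_extract_evaluation_py; infer_instance

-- ===== CLAIM (what is proved, stated in full; the proofs are below) =====
def Claim_equal_extract_evaluation_py : Prop := ∀ (evaluation_text : String), Dom_extract_evaluation_py evaluation_text → Spec_extract_evaluation_py evaluation_text (extract_evaluation_py evaluation_text)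

-- ===== LEMMAS AND PROOFS =====

-- A's strip-and-skip loop is B's loop over the stripped non-empty lines
theorem pv_foldl_strip_filter {σ : Type} (f : σ → List Char → σ) (init : σ) (l : List (List Char)) :
    l.foldl (fun s x => if PySem.Chars.strip x = [] then s else f s (PySem.Chars.strip x)) init
      = ((l.map PySem.Chars.strip).filter (fun t => !t.isEmpty)).foldl f init := by
  induction l generalizing init with
  | nil => rfl
  | cons x xs ih =>
    by_cases h : PySem.Chars.strip x = [] <;>
      simp [h, ih]

theorem pv_join_nil_cons (x : List Char) (xs : List (List Char)) :
    PySem.Chars.join [] (x :: xs) = x ++ PySem.Chars.join [] xs := by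
  cases xs <;> simp [PySem.Chars.join, List.intercalate, List.intersperse]

theorem pv_scoreMatch_eq (line : List Char) : pvScoreMatchA line = pvScoreOfB line := by
  unfold pvScoreMatchA pvScoreOfB
  by_cases h1 : pvTruthy (if PySem.Chars.isIn [':'] line then
      match (PySem.Chars.split₀ ((PySem.Chars.splitOnMax line [':'] 1).getD 1 [])).find?
          (fun w => PySem.Chars.strIsdigit w &&
            (decide (1 ≤ (PySem.Int.ofChars? w).getD 0) && decide ((PySem.Int.ofChars? w).getD 0 ≤ 10))) with
      | some w => some ((PySem.Int.ofChars? w).getD 0)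
      | none => none
    else none) <;>
    by_cases h2 : PySem.Chars.isIn ['/'] line <;>
    simp [h2]

theorem pv_tailB_ne_nil (ls : List (List Char)) (t : List (List Char)) (h : pvTailB ls = some t) :
    t ≠ [] := by
  induction ls with
  | nil => simp [pvTailB] at h
  | cons l rest ih =>
    rw [pvTailB] at h
    cases hr : pvTailB rest with
    | some t' => rw [hr] at h; cases h; exact ih hr
    | none =>
      rw [hr] at h
      by_cases hk : pvKeywordsB.any (fun k => PySem.Chars.isIn k (PySem.Chars.lower l)) = true
      · simp [hk] at h; cases h; simp
      · simp [hk] at h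

theorem pv_join_tail_ne_nil (t : List (List Char)) (ht : t ≠ []) :
    PySem.Chars.join [] (t.map (fun line => line ++ ['\n'])) ≠ [] := by
  cases t with
  | nil => exact absurd rfl ht
  | cons x xs => simp [pv_join_nil_cons]

theorem pv_assessA_true (ls : List (List Char)) (a : List Char) :
    ls.foldl pvAssessStepA (a, true)
      = (match pvTailB ls with
         | some t => PySem.Chars.join [] (t.map (fun line => line ++ ['\n']))
         | none => a ++ PySem.Chars.join [] (ls.map (fun line => line ++ ['\n'])), true) := by
  induction ls generalizing a with
  | nil => simp [pvTailB]
  | cons l rest ih =>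
    rw [List.foldl_cons, pvTailB]
    by_cases hk : pvKeywordsB.any (fun k => PySem.Chars.isIn k (PySem.Chars.lower l)) = true
    · have hstep : pvAssessStepA (a, true) l = (l ++ ['\n'], true) := by
        simp [pvAssessStepA, show pvKeywordsA = pvKeywordsB from rfl, hk]
      rw [hstep, ih]
      cases hr : pvTailB rest <;> simp [hr, hk, pv_join_nil_cons, List.append_assoc, List.cons_append]
    · have hstep : pvAssessStepA (a, true) l = (a ++ l ++ ['\n'], true) := by
        simp [pvAssessStepA, show pvKeywordsA = pvKeywordsB from rfl, hk]
      rw [hstep, ih]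
      cases hr : pvTailB rest <;> simp [hr, hk, pv_join_nil_cons, List.append_assoc, List.cons_append]

theorem pv_assessA_false (ls : List (List Char)) (a : List Char) :
    ls.foldl pvAssessStepA (a, false)
      = (match pvTailB ls with
         | some t => (PySem.Chars.join [] (t.map (fun line => line ++ ['\n'])), true)
         | none => (a, false)) := by
  induction ls generalizing a with
  | nil => simp [pvTailB]
  | cons l rest ih =>
    rw [List.foldl_cons, pvTailB]
    by_cases hk : pvKeywordsB.any (fun k => PySem.Chars.isIn k (PySem.Chars.lower l)) = true
    · have hstep : pvAssessStepA (a, false) l = (l ++ ['\n'], true) := by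
        simp [pvAssessStepA, show pvKeywordsA = pvKeywordsB from rfl, hk]
      rw [hstep, pv_assessA_true]
      cases hr : pvTailB rest <;> simp [hr, hk, pv_join_nil_cons, List.append_assoc, List.cons_append]
    · have hstep : pvAssessStepA (a, false) l = (a, false) := by
        simp [pvAssessStepA, show pvKeywordsA = pvKeywordsB from rfl, hk]
      rw [hstep, ih]
      cases hr : pvTailB rest <;> simp [hr, hk]

-- inserting at a key of a value-map dict rewrites that key's value in place
theorem pv_dictInsert_map (crit : List String) (v : String → Int) (k : String) (s : Int)
    (hk : k ∈ crit) :
    (PySem.Dict.mk (crit.map (fun c => (c, v c)))).insert k s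
      = PySem.Dict.mk (crit.map (fun c => (c, if c = k then s else v c))) := by
  have hc : (PySem.Dict.mk (crit.map (fun c => (c, v c)))).contains k = true := by
    simp only [PySem.Dict.contains, List.any_eq_true]
    exact ⟨(k, v k), List.mem_map_of_mem hk, by simp⟩
  rw [PySem.Dict.insert, if_pos hc]
  congr 1
  simp only [List.map_map]
  refine List.map_congr_left (fun c _ => ?_)
  by_cases hck : c = k <;> simp [hck]

-- A's inner criterion loop, on a dict in value-map form
theorem pv_foldInsert_map (cs : List String) (low : List Char) (dig : Bool) (m : Option Int)
    (v : String → Int) (h : ∀ c ∈ cs, c ∈ pvCriteriaA) :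
    cs.foldl (fun d criterion =>
        if PySem.Chars.isIn (PySem.Chars.lower criterion.toList) low && dig then
          if pvTruthy m then d.insert criterion (m.getD 0) else d
        else d)
        (PySem.Dict.mk (pvCriteriaA.map (fun c => (c, v c))))
      = PySem.Dict.mk (pvCriteriaA.map (fun c =>
          (c, if c ∈ cs ∧ (PySem.Chars.isIn (PySem.Chars.lower c.toList) low && dig) = true then
                (if pvTruthy m then m.getD 0 else v c)
              else v c))) := by
  induction cs generalizing v with
  | nil => simp
  | cons c0 rest ih =>
    rw [List.foldl_cons]
    by_cases hp : (PySem.Chars.isIn (PySem.Chars.lower c0.toList) low && dig) = true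
    · rw [if_pos hp]
      by_cases ht : pvTruthy m = true
      · rw [if_pos ht, pv_dictInsert_map _ v c0 (m.getD 0) (h c0 (by simp))]
        rw [ih (fun c => if c = c0 then m.getD 0 else v c) (fun c hc => h c (by simp [hc]))]
        congr 1
        refine List.map_congr_left (fun c _ => ?_)
        by_cases h1 : c ∈ rest ∧ (PySem.Chars.isIn (PySem.Chars.lower c.toList) low && dig) = true
        · simp [h1, ht]
        · by_cases h2 : c = c0
          · subst h2
            simp [hp, ht]
          · simp [h2, ht]
      · rw [if_neg ht, ih v (fun c hc => h c (by simp [hc]))]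
        congr 1
        refine List.map_congr_left (fun c _ => ?_)
        simp [ht]
    · rw [if_neg hp, ih v (fun c hc => h c (by simp [hc]))]
      congr 1
      refine List.map_congr_left (fun c _ => ?_)
      by_cases h1 : c ∈ rest ∧ (PySem.Chars.isIn (PySem.Chars.lower c.toList) low && dig) = true
      · simp [h1]
      · by_cases h2 : c = c0
        · subst h2
          simp [hp]
        · simp [h2]

-- the six criteria are already lowercase
theorem pv_lower_crit (c : String) (hc : c ∈ pvCriteriaA) :
    PySem.Chars.lower c.toList = c.toList := by
  simp only [pvCriteriaA, List.mem_cons, List.not_mem_nil, or_false] at hc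
  rcases hc with h | h | h | h | h | h <;> subst h <;> decide

theorem pv_stepA_map (v : String → Int) (line : List Char) :
    pvScoresStepA (PySem.Dict.mk (pvCriteriaA.map (fun c => (c, v c)))) line
      = PySem.Dict.mk (pvCriteriaA.map (fun c =>
          (c, if PySem.Chars.isIn c.toList (PySem.Chars.lower line) && line.any PySem.Chars.isdigit then
                (if pvTruthy (pvScoreOfB line) then (pvScoreOfB line).getD 0 else v c)
              else v c))) := by
  simp only [pvScoresStepA, pv_scoreMatch_eq]
  rw [pv_foldInsert_map pvCriteriaA (PySem.Chars.lower line) (line.any PySem.Chars.isdigit)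
        (pvScoreOfB line) v (fun c hc => hc)]
  congr 1
  refine List.map_congr_left (fun c hc => ?_)
  simp [pv_lower_crit c hc, hc]

theorem pv_scoresA_eq (lines : List (List Char)) :
    lines.foldl pvScoresStepA (PySem.Dict.mk (pvCriteriaA.map (fun c => (c, (0 : Int)))))
      = PySem.Dict.mk (pvCriteriaA.map (fun c => (c, pvLastScoreGoB c lines.reverse))) := by
  induction lines using List.reverseRecOn with
  | nil => rfl
  | append_singleton ls x ih =>
    rw [List.foldl_append, ih]
    simp only [List.foldl_cons, List.foldl_nil]
    rw [pv_stepA_map]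
    congr 1
    refine List.map_congr_left (fun c _ => ?_)
    simp only [List.reverse_append, List.reverse_singleton, List.singleton_append]
    rw [pvLastScoreGoB]

-- ===== VERDICT (by name: the statement is the Claim_ definition above) =====
theorem extract_evaluation_py_spec : Claim_equal_extract_evaluation_py := by
  intro evaluation_text _
  show extract_evaluation_py evaluation_text = extract_evaluation_py_alt evaluation_text
  simp only [extract_evaluation_py, extract_evaluation_py_alt]
  rw [show (⟨[("correctness", 0), ("completeness", 0), ("efficiency", 0),
        ("clarity", 0), ("robustness", 0), ("overall", 0)]⟩ : PySem.Dict String Int)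
      = PySem.Dict.mk (pvCriteriaA.map (fun c => (c, (0 : Int)))) from rfl]
  rw [pv_foldl_strip_filter pvLineStepA]
  rw [show ((PySem.Chars.splitOn evaluation_text.toList ['\n']).map PySem.Chars.strip).filter
        (fun t => !t.isEmpty) = pvLinesOf evaluation_text from rfl]
  rw [show List.foldl pvLineStepA
        (PySem.Dict.mk (pvCriteriaA.map (fun c => (c, (0 : Int)))), (([] : List Char), false))
        (pvLinesOf evaluation_text)
      = (List.foldl pvScoresStepA (PySem.Dict.mk (pvCriteriaA.map (fun c => (c, (0 : Int)))))
           (pvLinesOf evaluation_text),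
         List.foldl pvAssessStepA (([] : List Char), false) (pvLinesOf evaluation_text)) from
    PySem.List.foldl_prod_mk pvScoresStepA pvAssessStepA (pvLinesOf evaluation_text) _ _]
  rw [pv_scoresA_eq, pv_assessA_false]
  cases htl : pvTailB (pvLinesOf evaluation_text) with
  | none =>
    refine Prod.ext (by rfl) ?_
    show String.ofList (if ([] : List Char) = [] then _ else _) = _
    rw [if_pos rfl]
    cases hps : PySem.Chars.splitOn evaluation_text.toList ('\n' :: '\n' :: []) <;> simp
  | some t =>
    have hne := pv_join_tail_ne_nil t (pv_tailB_ne_nil _ _ htl)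
    refine Prod.ext (by rfl) ?_
    show String.ofList (if _ = [] then _ else _) = _
    rw [if_neg hne]
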